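-- pv_equiv track=rewrite | github.com/HBinhCT/Q-project | hackerrank/Algorithms/Deforestation/solution.py | deforestation
-- ===== SOURCE A (Python) =====
-- def deforestation(n, tree):
--     #
--     # Write your code here.
--     #
--     from collections import defaultdict
--
--     def calculate(graph, x, parent=0):
--         res = 0
--         for i in graph[x]:
--             if i != parent:
--                 res ^= calculate(graph, i, x)
--         return res + 1
--
--     adj = defaultdict(set)
--     for u, v in tree:
--         adj[u].add(v)
--         adj[v].add(u)
--     return 'Alice' if calculate(adj, 1) - 1 else 'Bob'
-- ===== SOURCE B (Python) =====
-- def deforestation(n, tree):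
--     # Iterative explicit-stack post-order traversal instead of recursion:
--     # acc[v] accumulates the XOR of the finished children's values of v;
--     # an (x, parent, False) entry folds x's final value into its parent.
--     adj = {}
--     for u, v in tree:
--         adj.setdefault(u, set()).add(v)
--         adj.setdefault(v, set()).add(u)
--     acc = {0: 0}
--     stack = [(1, 0, True)]
--     while stack:
--         x, parent, enter = stack.pop()
--         if enter:
--             acc[x] = 0
--             stack.append((x, parent, False))
--             for y in adj.get(x, ()):
--                 if y != parent:
--                     stack.append((y, x, True))
--         else:
--             acc[parent] ^= acc[x] + 1
--     return 'Alice' if acc[0] - 1 else 'Bob'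
-- ===== Notes on version B (the rewrite author's own statement) =====
-- stated objective: alternative
-- what changed: The recursive DFS computing each subtree's game value is replaced by an explicit-stack iterative post-order traversal that keeps, per node, a dictionary accumulator of the XOR of its finished children's values.
-- outside the precondition, e.g. on deforestation(7, [(1, 2), (1, 3), (2, 0), (0, 4), (2, 5), (5, 6)]): A returns 'Bob', B returns 'Alice'; on deforestation(5, [(3, 1), (3, 5), (1, 4), (4, 2), (3, 3)]): A returns 'Alice', B returns 'Bob'
import Mathlib
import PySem

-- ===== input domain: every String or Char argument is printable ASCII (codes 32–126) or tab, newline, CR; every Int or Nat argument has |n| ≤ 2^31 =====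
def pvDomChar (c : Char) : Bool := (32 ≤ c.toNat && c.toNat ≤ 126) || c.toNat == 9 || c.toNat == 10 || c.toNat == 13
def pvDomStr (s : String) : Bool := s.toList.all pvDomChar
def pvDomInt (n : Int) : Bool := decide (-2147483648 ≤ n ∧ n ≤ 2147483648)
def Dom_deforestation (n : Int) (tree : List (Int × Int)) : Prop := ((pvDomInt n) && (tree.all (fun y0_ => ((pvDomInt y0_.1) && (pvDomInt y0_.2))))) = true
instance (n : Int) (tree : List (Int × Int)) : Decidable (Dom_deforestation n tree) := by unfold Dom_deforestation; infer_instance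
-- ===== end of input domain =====

-- B replaces A's recursive DFS by an explicit-stack iterative post-order traversal with XOR
-- accumulators (objective: alternative decomposition; same O(n) cost, no recursion depth).

-- ===== PORT A =====
-- adj = defaultdict(set); for u, v in tree: adj[u].add(v); adj[v].add(u)
def pvAdjA (tree : List (Int × Int)) : PySem.Dict Int (PySem.Set Int) :=
  tree.foldl (fun adj uv =>
    let adj := adj.insert uv.1 (PySem.Set.add (adj.getD uv.1 PySem.Set.empty) uv.2)
    adj.insert uv.2 (PySem.Set.add (adj.getD uv.2 PySem.Set.empty) uv.1)) PySem.Dict.empty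

-- def calculate(graph, x, parent=0): res = 0; for i in graph[x]: if i != parent: res ^= calculate(graph, i, x); return res + 1
-- Fuel makes the recursion total; under Pre_ the DFS depth is < tree.length + 2, so the fuel
-- is never exhausted (the XOR fold over the neighbour set is order-independent).
def pvCalc (g : PySem.Dict Int (PySem.Set Int)) : Nat → Int → Int → Int
  | 0, _, _ => 1
  | f+1, x, parent =>
      (PySem.Dict.getD g x PySem.Set.empty).foldl
        (fun res i => if i ≠ parent then PySem.Int.bxor res (pvCalc g f i x) else res) 0 + 1

-- return 'Alice' if calculate(adj, 1) - 1 else 'Bob'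
def deforestation (n : Int) (tree : List (Int × Int)) : String :=
  let adj := pvAdjA tree
  if pvCalc adj (tree.length + 2) 1 0 - 1 ≠ 0 then "Alice" else "Bob"

-- ===== PORT B =====
-- adj = {}; for u, v in tree: adj.setdefault(u, set()).add(v); adj.setdefault(v, set()).add(u)
-- 'adj.setdefault(u, set()).add(v)' = insert the default, then overwrite the stored set
def pvAdjB (tree : List (Int × Int)) : PySem.Dict Int (PySem.Set Int) :=
  tree.foldl (fun adj uv =>
    let adj := PySem.Dict.setdefault adj uv.1 PySem.Set.empty
    let adj := adj.insert uv.1 (PySem.Set.add (adj.getD uv.1 PySem.Set.empty) uv.2)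
    let adj := PySem.Dict.setdefault adj uv.2 PySem.Set.empty
    adj.insert uv.2 (PySem.Set.add (adj.getD uv.2 PySem.Set.empty) uv.1)) PySem.Dict.empty

-- the while-stack loop of Source B; stack head = top; an entry (x, parent, enter).
-- Fuel makes the loop total; under Pre_ the loop performs at most 2·(tree.length+1) iterations,
-- far below (tree.length+3)^(tree.length+2), so the fuel is never exhausted.  acc[x] / acc[parent]
-- are read with getD 0: under Pre_ the key is always present (acc[x] is set on entry, acc[0] is
-- pre-seeded), so this is exact.
def pvRun (g : PySem.Dict Int (PySem.Set Int)) :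
    Nat → List (Int × Int × Bool) → PySem.Dict Int Int → PySem.Dict Int Int
  | 0, _, acc => acc
  | _+1, [], acc => acc
  | f+1, (x, p, true) :: st, acc =>
      pvRun g f
        ((PySem.Dict.getD g x PySem.Set.empty).foldl
          (fun s y => if y ≠ p then (y, x, true) :: s else s) ((x, p, false) :: st))
        (acc.insert x 0)
  | f+1, (x, p, false) :: st, acc =>
      pvRun g f st (acc.insert p (PySem.Int.bxor (acc.getD p 0) (acc.getD x 0 + 1)))

def deforestation_alt (n : Int) (tree : List (Int × Int)) : String :=
  let adj := pvAdjB tree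
  let acc := pvRun adj ((tree.length + 3) ^ (tree.length + 2)) [(1, 0, true)] (PySem.Dict.ofList [(0, 0)])
  if acc.getD 0 0 - 1 ≠ 0 then "Alice" else "Bob"

-- ===== PRECONDITION & SPEC =====
-- one closure pass over the edges: add to S every vertex joined by an edge to a vertex of S
def pvGrow (tree : List (Int × Int)) (S : List Int) : List Int :=
  tree.foldl (fun S uv =>
    let S := if uv.1 ∈ S ∧ uv.2 ∉ S then S ++ [uv.2] else S
    if uv.2 ∈ S ∧ uv.1 ∉ S then S ++ [uv.1] else S) S

-- the connected component of vertex 1 (2·tree.length+1 passes reach the fixpoint)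
def pvComp (tree : List (Int × Int)) : List Int := (pvGrow tree)^[2 * tree.length + 1] [1]

def pvNorm (uv : Int × Int) : Int × Int := if uv.1 ≤ uv.2 then uv else (uv.2, uv.1)

-- the distinct undirected edges incident to the component of 1
def pvEdges (tree : List (Int × Int)) : List (Int × Int) :=
  ((tree.filter (fun uv => uv.1 ∈ pvComp tree ∨ uv.2 ∈ pvComp tree)).map pvNorm).dedup

-- Pre_: the connected component of node 1 is a tree (connected with #edges = #vertices − 1,
-- hence acyclic and without self-loops) not containing vertex 0.  This is the problem's natural
-- domain (HackerRank trees on nodes 1..n).  It excludes (a) the inputs on which A's unbounded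
-- DFS never returns (a cycle through node 1's component), and (b) inputs on which A still
-- returns: components with a self-loop (A's DFS re-enters the looped node and walks the whole
-- component again) and components containing vertex 0, which collides with A's default-parent
-- sentinel 0 and makes A silently skip the 1–0 edge — artefacts of A's implementation.
def Pre_deforestation (n : Int) (tree : List (Int × Int)) : Prop :=
  (pvEdges tree).length + 1 = (pvComp tree).length ∧ (0 : Int) ∉ pvComp tree

instance (n : Int) (tree : List (Int × Int)) : Decidable (Pre_deforestation n tree) := by
  unfold Pre_deforestation; infer_instance

def pvWitness_deforestation : Int × (List (Int × Int)) := (3, [(1, 2), (2, 3)])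

def Spec_deforestation (n : Int) (tree : List (Int × Int)) (out : String) : Prop := out = deforestation_alt n tree
instance (n : Int) (tree : List (Int × Int)) (out : String) : Decidable (Spec_deforestation n tree out) := by unfold Spec_deforestation; infer_instance

-- ===== CLAIM (what is proved, stated in full; the proofs are below) =====
def Claim_equal_deforestation : Prop := ∀ (n : Int) (tree : List (Int × Int)), Dom_deforestation n tree → Pre_deforestation n tree → Spec_deforestation n tree (deforestation n tree)

-- ===== LEMMAS AND PROOFS =====

-- Python ^ on ints associates/commutes; PySem gives comm, we add assoc
theorem pvBxorEqXor (a b : Int) : PySem.Int.bxor a b = Int.xor a b := by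
  cases a <;> cases b <;> simp [PySem.Int.bxor, Int.xor, Int.negSucc_eq] <;> omega

theorem pvBxorAssoc (a b c : Int) :
    PySem.Int.bxor (PySem.Int.bxor a b) c = PySem.Int.bxor a (PySem.Int.bxor b c) := by
  simp only [pvBxorEqXor]; cases a <;> cases b <;> cases c <;> simp [Int.xor, Nat.xor_assoc]

theorem pvZeroBxor (a : Int) : PySem.Int.bxor 0 a = a := by
  rw [PySem.Int.bxor_comm]; exact PySem.Int.bxor_zero a

-- ---------- the machine's small-step equations ----------
theorem pvRun_nil (g : PySem.Dict Int (PySem.Set Int)) (f : Nat) (acc : PySem.Dict Int Int) :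
    pvRun g f [] acc = acc := by cases f <;> rfl

theorem pvRun_enter (g : PySem.Dict Int (PySem.Set Int)) (f : Nat) (x p : Int)
    (st : List (Int × Int × Bool)) (acc : PySem.Dict Int Int) :
    pvRun g (f+1) ((x, p, true) :: st) acc =
      pvRun g f
        ((PySem.Dict.getD g x PySem.Set.empty).foldl
          (fun s y => if y ≠ p then (y, x, true) :: s else s) ((x, p, false) :: st))
        (acc.insert x 0) := rfl

theorem pvRun_exit (g : PySem.Dict Int (PySem.Set Int)) (f : Nat) (x p : Int)
    (st : List (Int × Int × Bool)) (acc : PySem.Dict Int Int) :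
    pvRun g (f+1) ((x, p, false) :: st) acc =
      pvRun g f st (acc.insert p (PySem.Int.bxor (acc.getD p 0) (acc.getD x 0 + 1))) := rfl

-- ---------- adjacency ----------
def pvNbrs (tree : List (Int × Int)) (x : Int) : List Int :=
  PySem.Dict.getD (pvAdjA tree) x PySem.Set.empty

theorem pvNbrs_def (tree : List (Int × Int)) (x : Int) :
    PySem.Dict.getD (pvAdjA tree) x PySem.Set.empty = pvNbrs tree x := rfl

def pvAdjStep (adj : PySem.Dict Int (PySem.Set Int)) (uv : Int × Int) :
    PySem.Dict Int (PySem.Set Int) :=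
  let adj := adj.insert uv.1 (PySem.Set.add (adj.getD uv.1 PySem.Set.empty) uv.2)
  adj.insert uv.2 (PySem.Set.add (adj.getD uv.2 PySem.Set.empty) uv.1)

theorem pvAdjA_eq_foldl (tree : List (Int × Int)) :
    pvAdjA tree = tree.foldl pvAdjStep PySem.Dict.empty := rfl

theorem pvMemAdjStep (d : PySem.Dict Int (PySem.Set Int)) (uv : Int × Int) (x y : Int) :
    y ∈ (pvAdjStep d uv).getD x PySem.Set.empty ↔
      y ∈ d.getD x PySem.Set.empty ∨ (x = uv.1 ∧ y = uv.2) ∨ (x = uv.2 ∧ y = uv.1) := by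
  simp only [pvAdjStep, PySem.Dict.getD_insert]
  by_cases h2 : x = uv.2 <;> by_cases h1 : x = uv.1 <;>
    split_ifs <;> simp_all [PySem.Set.mem_add]

theorem pvMemAdjFoldl (l : List (Int × Int)) (d : PySem.Dict Int (PySem.Set Int)) (x y : Int) :
    y ∈ (l.foldl pvAdjStep d).getD x PySem.Set.empty ↔
      y ∈ d.getD x PySem.Set.empty ∨ (x, y) ∈ l ∨ (y, x) ∈ l := by
  induction l generalizing d with
  | nil => simp
  | cons uv l ih =>
      simp only [List.foldl_cons, ih, pvMemAdjStep, List.mem_cons, Prod.ext_iff]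
      tauto

theorem pvNodupAdjStep (d : PySem.Dict Int (PySem.Set Int)) (uv : Int × Int)
    (h : ∀ x, (d.getD x PySem.Set.empty).Nodup) (x : Int) :
    ((pvAdjStep d uv).getD x PySem.Set.empty).Nodup := by
  simp only [pvAdjStep, PySem.Dict.getD_insert]
  by_cases h2 : x = uv.2 <;> by_cases h1 : x = uv.1 <;> split_ifs <;>
    (repeat' apply PySem.Set.nodup_add) <;> exact h _

theorem pvNodupAdjFoldl (l : List (Int × Int)) (d : PySem.Dict Int (PySem.Set Int))
    (h : ∀ x, (d.getD x PySem.Set.empty).Nodup) (x : Int) :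
    ((l.foldl pvAdjStep d).getD x PySem.Set.empty).Nodup := by
  induction l generalizing d with
  | nil => exact h x
  | cons uv l ih => exact ih _ (pvNodupAdjStep d uv h)

theorem pvMemNbrs (tree : List (Int × Int)) (x y : Int) :
    y ∈ pvNbrs tree x ↔ (x, y) ∈ tree ∨ (y, x) ∈ tree := by
  rw [pvNbrs, pvAdjA_eq_foldl, pvMemAdjFoldl]
  simp [PySem.Dict.getD_empty, PySem.Set.empty]

theorem pvNbrsNodup (tree : List (Int × Int)) (x : Int) : (pvNbrs tree x).Nodup := by
  rw [pvNbrs, pvAdjA_eq_foldl]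
  exact pvNodupAdjFoldl tree PySem.Dict.empty
    (fun x => by simp [PySem.Dict.getD_empty, PySem.Set.empty]) x

-- ---------- reachability ----------
inductive pvReach (tree : List (Int × Int)) : Nat → Int → Prop
  | zero : pvReach tree 0 1
  | succ {k : Nat} {x y : Int} : pvReach tree k x → y ∈ pvNbrs tree x → pvReach tree (k+1) y

-- ---------- the closure computation ----------
def pvGrowStep (S : List Int) (uv : Int × Int) : List Int :=
  let S := if uv.1 ∈ S ∧ uv.2 ∉ S then S ++ [uv.2] else S
  if uv.2 ∈ S ∧ uv.1 ∉ S then S ++ [uv.1] else S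

theorem pvGrow_eq_foldl (tree : List (Int × Int)) (S : List Int) :
    pvGrow tree S = tree.foldl pvGrowStep S := rfl

theorem pvGrowStepPrefix (S : List Int) (uv : Int × Int) :
    ∃ t, pvGrowStep S uv = S ++ t := by
  simp only [pvGrowStep]
  split_ifs
  · exact ⟨[uv.2, uv.1], by simp⟩
  · exact ⟨[uv.2], rfl⟩
  · exact ⟨[uv.1], rfl⟩
  · exact ⟨[], by simp⟩

theorem pvGrowFoldlPrefix (l : List (Int × Int)) (S : List Int) :
    ∃ t, l.foldl pvGrowStep S = S ++ t := by
  induction l generalizing S with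
  | nil => exact ⟨[], by simp⟩
  | cons uv l ih =>
      obtain ⟨t1, ht1⟩ := pvGrowStepPrefix S uv
      obtain ⟨t2, ht2⟩ := ih (pvGrowStep S uv)
      exact ⟨t1 ++ t2, by rw [List.foldl_cons, ht2, ht1, List.append_assoc]⟩

theorem pvGrowFoldlSubset (l : List (Int × Int)) (S : List Int) :
    S ⊆ l.foldl pvGrowStep S := by
  obtain ⟨t, ht⟩ := pvGrowFoldlPrefix l S
  rw [ht]; exact fun a ha => List.mem_append_left _ ha

theorem pvGrowStepNodup (S : List Int) (uv : Int × Int) (h : S.Nodup) :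
    (pvGrowStep S uv).Nodup := by
  simp only [pvGrowStep]
  split_ifs <;> simp_all [List.nodup_append] <;> aesop

theorem pvGrowFoldlNodup (l : List (Int × Int)) (S : List Int) (h : S.Nodup) :
    (l.foldl pvGrowStep S).Nodup := by
  induction l generalizing S with
  | nil => exact h
  | cons uv l ih => exact ih _ (pvGrowStepNodup S uv h)

theorem pvGrowStepSound (S : List Int) (uv : Int × Int) (x : Int)
    (hx : x ∈ pvGrowStep S uv) : x ∈ S ∨ x = uv.1 ∨ x = uv.2 := by
  simp only [pvGrowStep] at hx
  split_ifs at hx <;> simp_all [List.mem_append] <;> tauto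

theorem pvGrowFoldlSound (l : List (Int × Int)) (S : List Int) (x : Int)
    (hx : x ∈ l.foldl pvGrowStep S) :
    x ∈ S ∨ ∃ uv ∈ l, x = uv.1 ∨ x = uv.2 := by
  induction l generalizing S with
  | nil => exact Or.inl hx
  | cons uv l ih =>
      rcases ih (pvGrowStep S uv) hx with h | ⟨uv', h1, h2⟩
      · rcases pvGrowStepSound S uv x h with h | h
        · exact Or.inl h
        · exact Or.inr ⟨uv, List.mem_cons_self, h⟩
      · exact Or.inr ⟨uv', List.mem_cons_of_mem _ h1, h2⟩

theorem pvGrowStepMono (S : List Int) (uv : Int × Int) : S ⊆ pvGrowStep S uv := by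
  obtain ⟨t, ht⟩ := pvGrowStepPrefix S uv
  rw [ht]; exact fun a ha => List.mem_append_left _ ha

theorem pvGrowStepClosed (S : List Int) (uv : Int × Int)
    (h : uv.1 ∈ S ∨ uv.2 ∈ S) : uv.1 ∈ pvGrowStep S uv ∧ uv.2 ∈ pvGrowStep S uv := by
  simp only [pvGrowStep]
  split_ifs <;> simp_all [List.mem_append] <;> tauto

theorem pvGrowFoldlClosed (l : List (Int × Int)) (S : List Int) (uv : Int × Int)
    (huv : uv ∈ l) :
    (uv.1 ∈ S → uv.2 ∈ l.foldl pvGrowStep S) ∧ (uv.2 ∈ S → uv.1 ∈ l.foldl pvGrowStep S) := by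
  induction l generalizing S with
  | nil => cases huv
  | cons uv' l ih =>
      rcases List.mem_cons.mp huv with rfl | h
      · refine ⟨fun hm => ?_, fun hm => ?_⟩ <;> rw [List.foldl_cons]
        · exact pvGrowFoldlSubset l _ (pvGrowStepClosed S uv (Or.inl hm)).2
        · exact pvGrowFoldlSubset l _ (pvGrowStepClosed S uv (Or.inr hm)).1
      · constructor <;> intro hm
        · exact (ih (pvGrowStep S uv') h).1 (pvGrowStepMono S uv' hm)
        · exact (ih (pvGrowStep S uv') h).2 (pvGrowStepMono S uv' hm)

theorem pvGrowStepReach (tree : List (Int × Int)) (S : List Int) (uv : Int × Int)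
    (huv : uv ∈ tree) (hS : ∀ x ∈ S, ∃ k, pvReach tree k x) :
    ∀ x ∈ pvGrowStep S uv, ∃ k, pvReach tree k x := by
  have h12 : uv.2 ∈ pvNbrs tree uv.1 := (pvMemNbrs tree _ _).mpr (Or.inl (by rwa [Prod.mk.eta]))
  have h21 : uv.1 ∈ pvNbrs tree uv.2 := (pvMemNbrs tree _ _).mpr (Or.inr (by rwa [Prod.mk.eta]))
  intro x hx
  simp only [pvGrowStep] at hx
  split_ifs at hx with h1 h2 h2
  · rcases List.mem_append.mp hx with hx' | hx'
    · rcases List.mem_append.mp hx' with hx'' | hx''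
      · exact hS x hx''
      · obtain ⟨k, hk⟩ := hS uv.1 h1.1
        cases List.mem_singleton.mp hx''
        exact ⟨k + 1, hk.succ h12⟩
    · cases List.mem_singleton.mp hx'
      exact hS uv.1 h1.1
  · rcases List.mem_append.mp hx with hx' | hx'
    · exact hS x hx'
    · obtain ⟨k, hk⟩ := hS uv.1 h1.1
      cases List.mem_singleton.mp hx'
      exact ⟨k + 1, hk.succ h12⟩
  · rcases List.mem_append.mp hx with hx' | hx'
    · exact hS x hx'
    · obtain ⟨k, hk⟩ := hS uv.2 h2.1
      cases List.mem_singleton.mp hx'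
      exact ⟨k + 1, hk.succ h21⟩
  · exact hS x hx

theorem pvGrowFoldlReach (tree l : List (Int × Int)) (S : List Int)
    (hl : ∀ uv ∈ l, uv ∈ tree) (hS : ∀ x ∈ S, ∃ k, pvReach tree k x) :
    ∀ x ∈ l.foldl pvGrowStep S, ∃ k, pvReach tree k x := by
  induction l generalizing S with
  | nil => exact hS
  | cons uv l ih =>
      intro x hx
      rw [List.foldl_cons] at hx
      exact ih (pvGrowStep S uv) (fun uv' h => hl uv' (List.mem_cons_of_mem _ h))
        (pvGrowStepReach tree S uv (hl uv List.mem_cons_self) hS) x hx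

-- ---------- the component ----------
theorem pvIterSubset (tree : List (Int × Int)) (k : Nat) (S : List Int) :
    S ⊆ (pvGrow tree)^[k] S := by
  induction k generalizing S with
  | zero => simp [Function.iterate_zero]
  | succ k ih =>
      rw [Function.iterate_succ_apply]
      intro a ha
      exact ih (pvGrow tree S) (by rw [pvGrow_eq_foldl]; exact pvGrowFoldlSubset tree S ha)

theorem pvCompOne (tree : List (Int × Int)) : (1 : Int) ∈ pvComp tree :=
  pvIterSubset tree _ [1] (List.mem_singleton.mpr rfl)

theorem pvIterNodup (tree : List (Int × Int)) (k : Nat) (S : List Int) (h : S.Nodup) :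
    ((pvGrow tree)^[k] S).Nodup := by
  induction k generalizing S with
  | zero => simpa
  | succ k ih =>
      rw [Function.iterate_succ_apply]
      exact ih _ (by rw [pvGrow_eq_foldl]; exact pvGrowFoldlNodup tree S h)

theorem pvCompNodup (tree : List (Int × Int)) : (pvComp tree).Nodup :=
  pvIterNodup tree _ [1] (List.nodup_singleton 1)

theorem pvIterSound (tree : List (Int × Int)) (k : Nat) (S : List Int) (x : Int)
    (hx : x ∈ (pvGrow tree)^[k] S) : x ∈ S ∨ ∃ uv ∈ tree, x = uv.1 ∨ x = uv.2 := by
  induction k generalizing S with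
  | zero => exact Or.inl (by simpa using hx)
  | succ k ih =>
      rw [Function.iterate_succ_apply] at hx
      rcases ih _ hx with h | h
      · rw [pvGrow_eq_foldl] at h
        exact pvGrowFoldlSound tree S x h
      · exact Or.inr h

theorem pvLenFlat (tree : List (Int × Int)) :
    (tree.flatMap fun uv => [uv.1, uv.2]).length = 2 * tree.length := by
  induction tree with
  | nil => simp
  | cons uv l ih => simp [List.flatMap_cons, ih]; omega

theorem pvIterLenBound (tree : List (Int × Int)) (k : Nat) :
    ((pvGrow tree)^[k] [1]).length ≤ 2 * tree.length + 1 := by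
  set big : List Int := 1 :: tree.flatMap fun uv => [uv.1, uv.2] with hbig
  have hsub : (pvGrow tree)^[k] [1] ⊆ big.dedup := by
    intro a ha
    rw [List.mem_dedup]
    rcases pvIterSound tree k [1] a ha with h | ⟨uv, h1, h2⟩
    · exact List.mem_cons.mpr (Or.inl (List.mem_singleton.mp h))
    · refine List.mem_cons.mpr (Or.inr (List.mem_flatMap.mpr ⟨uv, h1, ?_⟩))
      rcases h2 with rfl | rfl <;> simp
  calc ((pvGrow tree)^[k] [1]).length
      ≤ big.dedup.length :=
        (List.subperm_of_subset (pvIterNodup tree k [1] (List.nodup_singleton 1)) hsub).length_le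
    _ ≤ big.length := (List.dedup_sublist big).length_le
    _ = 2 * tree.length + 1 := by rw [hbig, List.length_cons, pvLenFlat]

theorem pvIterGrowth (tree : List (Int × Int)) (k : Nat)
    (h : ∀ j < k, pvGrow tree ((pvGrow tree)^[j] [1]) ≠ (pvGrow tree)^[j] [1]) :
    k + 1 ≤ ((pvGrow tree)^[k] [1]).length := by
  induction k with
  | zero => simp
  | succ k ih =>
      have hk := ih (fun j hj => h j (Nat.lt_succ_of_lt hj))
      have hne := h k (Nat.lt_succ_self k)
      rw [Function.iterate_succ_apply']
      obtain ⟨t, ht⟩ : ∃ t, pvGrow tree ((pvGrow tree)^[k] [1]) = (pvGrow tree)^[k] [1] ++ t := by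
        rw [pvGrow_eq_foldl]; exact pvGrowFoldlPrefix tree ((pvGrow tree)^[k] [1])
      have htne : t ≠ [] := by
        intro h0; rw [h0, List.append_nil] at ht; exact hne ht
      rw [ht, List.length_append]
      have : 1 ≤ t.length := List.length_pos_iff.mpr htne
      omega

theorem pvCompFix (tree : List (Int × Int)) : pvGrow tree (pvComp tree) = pvComp tree := by
  have hex : ∃ j, j ≤ 2 * tree.length ∧
      pvGrow tree ((pvGrow tree)^[j] [1]) = (pvGrow tree)^[j] [1] := by
    by_contra hno
    push Not at hno
    have h := pvIterGrowth tree (2 * tree.length + 1) ?_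
    · have := pvIterLenBound tree (2 * tree.length + 1)
      omega
    · intro j hj
      exact hno j (by omega)
  obtain ⟨j, hj, hfix⟩ := hex
  have heq : pvComp tree = (pvGrow tree)^[j] [1] := by
    rw [pvComp]
    have : 2 * tree.length + 1 = (2 * tree.length + 1 - j) + j := by omega
    rw [this, Function.iterate_add_apply]
    exact Function.iterate_fixed hfix _
  rw [heq]; exact hfix

theorem pvCompClosed (tree : List (Int × Int)) (x y : Int)
    (hx : x ∈ pvComp tree) (hy : y ∈ pvNbrs tree x) : y ∈ pvComp tree := by
  have hfix := pvCompFix tree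
  rcases (pvMemNbrs tree x y).mp hy with h | h
  · have := (pvGrowFoldlClosed tree (pvComp tree) (x, y) h).1 hx
    rwa [← pvGrow_eq_foldl, hfix] at this
  · have := (pvGrowFoldlClosed tree (pvComp tree) (y, x) h).2 hx
    rwa [← pvGrow_eq_foldl, hfix] at this

theorem pvIterReach (tree : List (Int × Int)) (k : Nat) :
    ∀ x ∈ (pvGrow tree)^[k] [1], ∃ k', pvReach tree k' x := by
  induction k with
  | zero =>
      intro x hx
      cases List.mem_singleton.mp hx
      exact ⟨0, pvReach.zero⟩
  | succ k ih =>
      rw [Function.iterate_succ_apply']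
      rw [pvGrow_eq_foldl]
      exact pvGrowFoldlReach tree tree _ (fun uv h => h) ih

theorem pvCompSound (tree : List (Int × Int)) (x : Int) (hx : x ∈ pvComp tree) :
    ∃ k, pvReach tree k x := pvIterReach tree _ x hx

theorem pvReachComp (tree : List (Int × Int)) (k : Nat) (x : Int)
    (h : pvReach tree k x) : x ∈ pvComp tree := by
  induction h with
  | zero => exact pvCompOne tree
  | succ hr hy ih => exact pvCompClosed tree _ _ ih hy

-- ---------- BFS distance and parent ----------
noncomputable def pvD (tree : List (Int × Int)) (x : Int) : Nat :=
  sInf {k | pvReach tree k x}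

noncomputable def pvPar (tree : List (Int × Int)) (x : Int) : Int :=
  @dite _ (∃ y, pvReach tree (pvD tree x - 1) y ∧ x ∈ pvNbrs tree y)
    (Classical.propDecidable _) (fun h => h.choose) (fun _ => 0)

theorem pvDOne (tree : List (Int × Int)) : pvD tree 1 = 0 :=
  Nat.sInf_eq_zero.mpr (Or.inl (pvReach.zero))

theorem pvReachD (tree : List (Int × Int)) (x : Int) (hx : x ∈ pvComp tree) :
    pvReach tree (pvD tree x) x :=
  Nat.sInf_mem (pvCompSound tree x hx)

theorem pvDLe (tree : List (Int × Int)) (k : Nat) (x : Int) (h : pvReach tree k x) :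
    pvD tree x ≤ k := Nat.sInf_le h

theorem pvDZero (tree : List (Int × Int)) (x : Int) (hx : x ∈ pvComp tree)
    (h : pvD tree x = 0) : x = 1 := by
  have := pvReachD tree x hx
  rw [h] at this
  cases this; rfl

theorem pvParProps (tree : List (Int × Int)) (x : Int) (hx : x ∈ pvComp tree) (h1 : x ≠ 1) :
    pvPar tree x ∈ pvComp tree ∧ x ∈ pvNbrs tree (pvPar tree x) ∧
      pvD tree (pvPar tree x) + 1 = pvD tree x := by
  have hd0 : pvD tree x ≠ 0 := fun h => h1 (pvDZero tree x hx h)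
  have hr := pvReachD tree x hx
  obtain ⟨m, hm⟩ : ∃ m, pvD tree x = m + 1 := ⟨pvD tree x - 1, by omega⟩
  rw [hm] at hr
  have hex : ∃ y, pvReach tree (pvD tree x - 1) y ∧ x ∈ pvNbrs tree y := by
    cases hr with
    | succ hr' hyn => exact ⟨_, by rw [hm]; simpa using hr', hyn⟩
  have hpar : pvPar tree x = hex.choose := by rw [pvPar, dif_pos hex]
  obtain ⟨hre, hnb⟩ := hex.choose_spec
  have hpc : hex.choose ∈ pvComp tree := pvReachComp tree _ _ hre
  have hle : pvD tree hex.choose ≤ pvD tree x - 1 := pvDLe tree _ _ hre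
  have hge : pvD tree x ≤ pvD tree hex.choose + 1 :=
    pvDLe tree _ _ ((pvReachD tree _ hpc).succ hnb)
  exact ⟨hpar ▸ hpc, hpar ▸ hnb, by rw [hpar]; omega⟩

theorem pvChainList (tree : List (Int × Int)) :
    ∀ n x, x ∈ pvComp tree → pvD tree x = n →
      ∃ l : List Int, l.Nodup ∧ (∀ v ∈ l, v ∈ pvComp tree) ∧
        (∀ v ∈ l, pvD tree v ≤ n) ∧ l.length = n + 1 := by
  intro n
  induction n using Nat.strong_induction_on with
  | _ n ih =>
    intro x hx hdx
    match n, hdx with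
    | 0, hdx => exact ⟨[x], List.nodup_singleton x, by simpa, by simp [hdx], rfl⟩
    | m + 1, hdx =>
        have h1 : x ≠ 1 := fun h => by rw [h, pvDOne] at hdx; omega
        obtain ⟨hpc, _, hpd⟩ := pvParProps tree x hx h1
        obtain ⟨l, hnd, hcomp, hdle, hlen⟩ := ih m (by omega) (pvPar tree x) hpc (by omega)
        refine ⟨x :: l, ?_, ?_, ?_, by simp [hlen]⟩
        · refine List.nodup_cons.mpr ⟨fun hmem => ?_, hnd⟩
          have := hdle x hmem; omega
        · intro v hv
          rcases List.mem_cons.mp hv with rfl | hv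
          · exact hx
          · exact hcomp v hv
        · intro v hv
          rcases List.mem_cons.mp hv with rfl | hv
          · omega
          · have := hdle v hv; omega

theorem pvDLt (tree : List (Int × Int)) (x : Int) (hx : x ∈ pvComp tree) :
    pvD tree x < (pvComp tree).length := by
  obtain ⟨l, hnd, hcomp, _, hlen⟩ := pvChainList tree (pvD tree x) x hx rfl
  have := (List.subperm_of_subset hnd hcomp).length_le
  omega

-- ---------- every component edge is a parent edge (pigeonhole) ----------
theorem pvNormComm (a b : Int) : pvNorm (a, b) = pvNorm (b, a) := by
  simp only [pvNorm]; split <;> split <;> simp_all <;> omega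

theorem pvNormEq (a b c d : Int) (h : pvNorm (a, b) = pvNorm (c, d)) :
    (a = c ∧ b = d) ∨ (a = d ∧ b = c) := by
  simp only [pvNorm] at h; split at h <;> split at h <;>
    simp only [Prod.mk.injEq] at h <;> omega

theorem pvEdgesLen (tree : List (Int × Int)) : (pvEdges tree).length ≤ tree.length := by
  calc (pvEdges tree).length
      ≤ ((tree.filter (fun uv => uv.1 ∈ pvComp tree ∨ uv.2 ∈ pvComp tree)).map pvNorm).length :=
        (List.dedup_sublist _).length_le
    _ ≤ tree.length := by rw [List.length_map]; exact List.length_filter_le _ _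

theorem pvParEdgeMem (tree : List (Int × Int)) (x : Int) (hx : x ∈ pvComp tree) (h1 : x ≠ 1) :
    pvNorm (x, pvPar tree x) ∈ pvEdges tree := by
  obtain ⟨hpc, hnb, _⟩ := pvParProps tree x hx h1
  rw [pvEdges, List.mem_dedup, List.mem_map]
  rcases (pvMemNbrs tree _ _).mp hnb with h | h
  · exact ⟨(pvPar tree x, x), List.mem_filter.mpr ⟨h, by simp [hx]⟩, pvNormComm _ _⟩
  · exact ⟨(x, pvPar tree x), List.mem_filter.mpr ⟨h, by simp [hx]⟩, rfl⟩

theorem pvParSurj (tree : List (Int × Int))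
    (hE : (pvEdges tree).length + 1 = (pvComp tree).length) :
    ∀ e ∈ pvEdges tree, ∃ x, x ∈ pvComp tree ∧ x ≠ 1 ∧ pvNorm (x, pvPar tree x) = e := by
  intro e he
  set F : Finset Int := (pvComp tree).toFinset.erase 1 with hF
  have hFcard : F.card = (pvComp tree).length - 1 := by
    rw [hF, Finset.card_erase_of_mem (List.mem_toFinset.mpr (pvCompOne tree)),
      List.toFinset_card_of_nodup (pvCompNodup tree)]
  have himg : F.image (fun v => pvNorm (v, pvPar tree v)) ⊆ (pvEdges tree).toFinset := by
    intro e' he'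
    obtain ⟨v, hvF, rfl⟩ := Finset.mem_image.mp he'
    obtain ⟨hv1, hv2⟩ := Finset.mem_erase.mp hvF
    exact List.mem_toFinset.mpr (pvParEdgeMem tree v (List.mem_toFinset.mp hv2) hv1)
  have hinj : Set.InjOn (fun v => pvNorm (v, pvPar tree v)) F := by
    intro a ha b hb hab
    obtain ⟨ha1, ha2⟩ := Finset.mem_erase.mp ha
    obtain ⟨hb1, hb2⟩ := Finset.mem_erase.mp hb
    rcases pvNormEq _ _ _ _ hab with ⟨h1, h2⟩ | ⟨h1, h2⟩
    · exact h1
    · exfalso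
      have hda := (pvParProps tree a (List.mem_toFinset.mp ha2) ha1).2.2
      have hdb := (pvParProps tree b (List.mem_toFinset.mp hb2) hb1).2.2
      rw [h2] at hda
      rw [← h1] at hdb
      omega
  have hcard : ((pvEdges tree).toFinset).card ≤ (F.image (fun v => pvNorm (v, pvPar tree v))).card := by
    have hnd : (pvEdges tree).Nodup := by rw [pvEdges]; exact List.nodup_dedup _
    rw [Finset.card_image_of_injOn hinj, hFcard, List.toFinset_card_of_nodup hnd]
    omega
  have heq := Finset.eq_of_subset_of_card_le himg hcard
  have heF : e ∈ (pvEdges tree).toFinset := List.mem_toFinset.mpr he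
  rw [← heq] at heF
  obtain ⟨v, hvF, hve⟩ := Finset.mem_image.mp heF
  obtain ⟨hv1, hv2⟩ := Finset.mem_erase.mp hvF
  exact ⟨v, List.mem_toFinset.mp hv2, hv1, hve⟩

theorem pvEdgeIsParEdge (tree : List (Int × Int))
    (hE : (pvEdges tree).length + 1 = (pvComp tree).length)
    (x y : Int) (hx : x ∈ pvComp tree) (hy : y ∈ pvNbrs tree x) :
    (x ≠ 1 ∧ y = pvPar tree x) ∨ (y ≠ 1 ∧ pvPar tree y = x) := by
  have he : pvNorm (x, y) ∈ pvEdges tree := by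
    rw [pvEdges, List.mem_dedup, List.mem_map]
    rcases (pvMemNbrs tree x y).mp hy with h | h
    · exact ⟨(x, y), List.mem_filter.mpr ⟨h, by simp [hx]⟩, rfl⟩
    · exact ⟨(y, x), List.mem_filter.mpr ⟨h, by simp [hx]⟩, pvNormComm _ _⟩
  obtain ⟨z, hzc, hz1, hze⟩ := pvParSurj tree hE _ he
  rcases pvNormEq _ _ _ _ hze with ⟨h1, h2⟩ | ⟨h1, h2⟩
  · rw [h1] at hz1 h2
    exact Or.inl ⟨hz1, h2.symm⟩
  · rw [h1] at hz1 h2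
    exact Or.inr ⟨hz1, h2⟩

-- ---------- DFS frames and children ----------
def pvGood (tree : List (Int × Int)) (x q : Int) : Prop :=
  x ∈ pvComp tree ∧ ((x = 1 ∧ q = 0) ∨ (x ≠ 1 ∧ q = pvPar tree x))

theorem pvChild (tree : List (Int × Int))
    (hE : (pvEdges tree).length + 1 = (pvComp tree).length)
    (h0 : (0 : Int) ∉ pvComp tree)
    (x q y : Int) (hG : pvGood tree x q) (hy : y ∈ pvNbrs tree x) (hyq : y ≠ q) :
    y ∈ pvComp tree ∧ y ≠ 1 ∧ pvPar tree y = x ∧ pvD tree y = pvD tree x + 1 ∧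
      pvGood tree y x := by
  obtain ⟨hx, hcase⟩ := hG
  have hyc : y ∈ pvComp tree := pvCompClosed tree x y hx hy
  have hkey : y ≠ 1 ∧ pvPar tree y = x := by
    rcases pvEdgeIsParEdge tree hE x y hx hy with ⟨hx1, hypar⟩ | h
    · exfalso
      rcases hcase with ⟨h1, _⟩ | ⟨_, hq⟩
      · exact hx1 h1
      · exact hyq (hypar.trans hq.symm)
    · exact h
  obtain ⟨hy1, hpy⟩ := hkey
  have hdy := (pvParProps tree y hyc hy1).2.2
  rw [hpy] at hdy
  exact ⟨hyc, hy1, hpy, by omega, hyc, Or.inr ⟨hy1, hpy.symm⟩⟩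

-- ---------- the common value function ----------
noncomputable def pvCq (tree : List (Int × Int)) (x : Int) : Int :=
  if x = 1 then 0 else pvPar tree x

noncomputable def pvVal (tree : List (Int × Int)) (x : Int) : Int :=
  pvCalc (pvAdjA tree) ((pvComp tree).length - pvD tree x) x (pvCq tree x)

theorem pvGoodCq (tree : List (Int × Int)) (x q : Int) (hG : pvGood tree x q) :
    q = pvCq tree x := by
  obtain ⟨_, h | h⟩ := hG <;> simp [pvCq, h.1, h.2]

theorem pvCalcFuelIrrel (tree : List (Int × Int))
    (hE : (pvEdges tree).length + 1 = (pvComp tree).length)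
    (h0 : (0 : Int) ∉ pvComp tree) :
    ∀ f₁ f₂ x q, pvGood tree x q →
      (pvComp tree).length ≤ f₁ + pvD tree x → (pvComp tree).length ≤ f₂ + pvD tree x →
      pvCalc (pvAdjA tree) f₁ x q = pvCalc (pvAdjA tree) f₂ x q := by
  intro f₁
  induction f₁ with
  | zero =>
      intro f₂ x q hG hb1 hb2
      exfalso
      have := pvDLt tree x hG.1
      omega
  | succ a ih =>
      intro f₂ x q hG hb1 hb2
      cases f₂ with
      | zero =>
          exfalso
          have := pvDLt tree x hG.1
          omega
      | succ b =>
          simp only [pvCalc]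
          congr 1
          apply PySem.List.foldl_congr_mem
          intro acc y hy
          by_cases hyq : y = q
          · simp [hyq]
          · have hy' : y ∈ pvNbrs tree x := hy
            obtain ⟨hyc, hy1, hpy, hdy, hGy⟩ := pvChild tree hE h0 x q y hG hy' hyq
            rw [if_pos hyq, if_pos hyq, ih b y x hGy (by omega) (by omega)]

theorem pvCalcVal (tree : List (Int × Int))
    (hE : (pvEdges tree).length + 1 = (pvComp tree).length)
    (h0 : (0 : Int) ∉ pvComp tree)
    (f : Nat) (x q : Int) (hG : pvGood tree x q)
    (hf : (pvComp tree).length ≤ f + pvD tree x) :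
    pvCalc (pvAdjA tree) f x q = pvVal tree x := by
  have hx := hG.1
  have hle := le_of_lt (pvDLt tree x hx)
  have := pvCalcFuelIrrel tree hE h0 f ((pvComp tree).length - pvD tree x) x q hG hf (by omega)
  rw [this, pvVal, pvGoodCq tree x q hG]

theorem pvValUnfold (tree : List (Int × Int))
    (hE : (pvEdges tree).length + 1 = (pvComp tree).length)
    (h0 : (0 : Int) ∉ pvComp tree)
    (x q : Int) (hG : pvGood tree x q) :
    pvVal tree x =
      (pvNbrs tree x).foldl
        (fun r y => if y ≠ q then PySem.Int.bxor r (pvVal tree y) else r) 0 + 1 := by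
  have hx := hG.1
  have hlt := pvDLt tree x hx
  obtain ⟨m, hm⟩ : ∃ m, (pvComp tree).length - pvD tree x = m + 1 :=
    ⟨(pvComp tree).length - pvD tree x - 1, by omega⟩
  conv_lhs => rw [pvVal, ← pvGoodCq tree x q hG, hm]
  simp only [pvCalc]
  congr 1
  apply PySem.List.foldl_congr_mem
  intro acc y hy
  by_cases hyq : y = q
  · simp [hyq]
  · have hy' : y ∈ pvNbrs tree x := hy
    obtain ⟨hyc, hy1, hpy, hdy, hGy⟩ := pvChild tree hE h0 x q y hG hy' hyq
    rw [if_pos hyq, if_pos hyq, pvCalcVal tree hE h0 m y x hGy (by omega)]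

-- ---------- descendants ----------
inductive pvDesc (tree : List (Int × Int)) (x : Int) : Int → Prop
  | base : pvDesc tree x x
  | step {v : Int} : v ∈ pvComp tree → v ≠ 1 → pvDesc tree x (pvPar tree v) → pvDesc tree x v

theorem pvDescComp (tree : List (Int × Int)) (x v : Int) (hx : x ∈ pvComp tree)
    (h : pvDesc tree x v) : v ∈ pvComp tree := by
  cases h with
  | base => exact hx
  | step hv _ _ => exact hv

theorem pvDescD (tree : List (Int × Int)) (x v : Int) (hx : x ∈ pvComp tree)
    (h : pvDesc tree x v) : pvD tree x ≤ pvD tree v := by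
  induction h with
  | base => exact le_refl _
  | step hv h1 _ ih =>
      have := (pvParProps tree _ hv h1).2.2
      omega

theorem pvDescTrans (tree : List (Int × Int)) (x y k : Int)
    (h1 : pvDesc tree y k) (h2 : pvDesc tree x y) : pvDesc tree x k := by
  induction h1 with
  | base => exact h2
  | step hv hne _ ih => exact pvDesc.step hv hne ih

-- ---------- the machine simulation ----------
theorem pvInner (tree : List (Int × Int))
    (hE : (pvEdges tree).length + 1 = (pvComp tree).length)
    (h0 : (0 : Int) ∉ pvComp tree) (m : Nat)
    (IH : ∀ x q, pvGood tree x q → (pvComp tree).length = pvD tree x + m →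
      ∀ st acc, ∃ c acc',
        (∀ f, pvRun (pvAdjA tree) (c + f) ((x, q, true) :: st) acc =
              pvRun (pvAdjA tree) f st acc') ∧
        (∀ k, ¬pvDesc tree x k →
            acc'.getD k 0 =
              if k = q then PySem.Int.bxor (acc.getD q 0) (pvVal tree x) else acc.getD k 0) ∧
        c ≤ ((pvComp tree).length + 2) ^ m)
    (x q : Int) (hG : pvGood tree x q)
    (hm : (pvComp tree).length = pvD tree x + (m + 1)) :
    ∀ ys : List Int, ys.Nodup → (∀ y ∈ ys, y ∈ pvNbrs tree x) →
      ∀ st acc, ∃ c acc',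
        (∀ f, pvRun (pvAdjA tree) (c + f)
                (ys.foldl (fun s y => if y ≠ q then (y, x, true) :: s else s) st) acc =
              pvRun (pvAdjA tree) f st acc') ∧
        (∀ k, (∀ y ∈ ys, y ≠ q → ¬pvDesc tree y k) →
            acc'.getD k 0 =
              if k = x then
                PySem.Int.bxor (acc.getD x 0)
                  (ys.foldl (fun r y => if y ≠ q then PySem.Int.bxor r (pvVal tree y) else r) 0)
              else acc.getD k 0) ∧
        c ≤ ys.length * ((pvComp tree).length + 2) ^ m := by
  intro ys
  induction ys using List.reverseRecOn with
  | nil =>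
      intro _ _ st acc
      refine ⟨0, acc, fun f => by simp, ?_, by simp⟩
      intro k _
      by_cases hkx : k = x
      · subst hkx
        simp [PySem.Int.bxor_zero]
      · simp [hkx]
  | append_singleton ys' y ihl =>
      intro hnd hsub st acc
      obtain ⟨hnd', hndy, hdisj⟩ := List.nodup_append.mp hnd
      have hsub' : ∀ y' ∈ ys', y' ∈ pvNbrs tree x :=
        fun y' h => hsub y' (List.mem_append_left _ h)
      have hymem : y ∈ pvNbrs tree x :=
        hsub y (List.mem_append_right _ (List.mem_singleton.mpr rfl))
      by_cases hyq : y = q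
      · obtain ⟨c, acc', hrun, hacc, hc⟩ := ihl hnd' hsub' st acc
        refine ⟨c, acc', ?_, ?_, ?_⟩
        · intro f
          rw [List.foldl_append]
          simpa [hyq] using hrun f
        · intro k hk
          rw [List.foldl_append]
          simp only [List.foldl_cons, List.foldl_nil, hyq, ne_eq, ite_not]
          have := hacc k (fun y' h hne => hk y' (List.mem_append_left _ h) hne)
          simpa [hyq] using this
        · calc c ≤ ys'.length * ((pvComp tree).length + 2) ^ m := hc
            _ ≤ (ys' ++ [y]).length * ((pvComp tree).length + 2) ^ m := by
                have : ys'.length ≤ (ys' ++ [y]).length := by simp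
                exact Nat.mul_le_mul_right _ this
      · obtain ⟨hyc, hy1, hpy, hdy, hGy⟩ := pvChild tree hE h0 x q y hG hymem hyq
        obtain ⟨c₁, acc₁, hrun₁, hacc₁, hc₁⟩ := IH y x hGy (by omega)
          (ys'.foldl (fun s y => if y ≠ q then (y, x, true) :: s else s) st) acc
        obtain ⟨c₂, acc₂, hrun₂, hacc₂, hc₂⟩ := ihl hnd' hsub' st acc₁
        refine ⟨c₁ + c₂, acc₂, ?_, ?_, ?_⟩
        · intro f
          rw [List.foldl_append]
          simp only [List.foldl_cons, List.foldl_nil, if_pos hyq]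
          have harith : c₁ + c₂ + f = c₁ + (c₂ + f) := by omega
          rw [harith, hrun₁ (c₂ + f), hrun₂ f]
        · intro k hk
          have hky : ¬pvDesc tree y k :=
            hk y (List.mem_append_right _ (List.mem_singleton.mpr rfl)) hyq
          have hkys' : ∀ y' ∈ ys', y' ≠ q → ¬pvDesc tree y' k :=
            fun y' h hne => hk y' (List.mem_append_left _ h) hne
          rw [hacc₂ k hkys']
          by_cases hkx : k = x
          · subst hkx
            have hnyx : ¬pvDesc tree y k := by
              intro hdx
              have := pvDescD tree y k hyc hdx
              omega
            rw [if_pos rfl, hacc₁ k hnyx, if_pos rfl, if_pos rfl]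
            rw [List.foldl_append]
            simp only [List.foldl_cons, List.foldl_nil, if_pos hyq]
            rw [pvBxorAssoc, PySem.Int.bxor_comm (pvVal tree y) _]
          · rw [if_neg hkx, hacc₁ k hky, if_neg hkx, if_neg hkx]
        · calc c₁ + c₂
              ≤ ((pvComp tree).length + 2) ^ m +
                ys'.length * ((pvComp tree).length + 2) ^ m := Nat.add_le_add hc₁ hc₂
            _ = (ys'.length + 1) * ((pvComp tree).length + 2) ^ m := by ring
            _ = (ys' ++ [y]).length * ((pvComp tree).length + 2) ^ m := by simp

theorem pvMain (tree : List (Int × Int))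
    (hE : (pvEdges tree).length + 1 = (pvComp tree).length)
    (h0 : (0 : Int) ∉ pvComp tree) :
    ∀ m x q, pvGood tree x q → (pvComp tree).length = pvD tree x + m →
      ∀ st acc, ∃ c acc',
        (∀ f, pvRun (pvAdjA tree) (c + f) ((x, q, true) :: st) acc =
              pvRun (pvAdjA tree) f st acc') ∧
        (∀ k, ¬pvDesc tree x k →
            acc'.getD k 0 =
              if k = q then PySem.Int.bxor (acc.getD q 0) (pvVal tree x) else acc.getD k 0) ∧
        c ≤ ((pvComp tree).length + 2) ^ m := by
  intro m
  induction m with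
  | zero =>
      intro x q hG hm
      exfalso
      have := pvDLt tree x hG.1
      omega
  | succ m ihm =>
      intro x q hG hm st acc
      obtain ⟨cin, acc₂, hrun, hacc, hcin⟩ :=
        pvInner tree hE h0 m ihm x q hG hm (pvNbrs tree x) (pvNbrsNodup tree x)
          (fun y h => h) ((x, q, false) :: st) (acc.insert x 0)
      have hqx : q ≠ x := by
        rcases hG.2 with ⟨hx1, hq0⟩ | ⟨hx1, hqp⟩
        · subst hq0
          exact fun h => h0 (by rw [h]; exact hG.1)
        · subst hqp
          have := (pvParProps tree x hG.1 hx1).2.2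
          intro h
          rw [h] at this
          omega
      refine ⟨cin + 2,
        acc₂.insert q (PySem.Int.bxor (acc₂.getD q 0) (acc₂.getD x 0 + 1)), ?_, ?_, ?_⟩
      · intro f
        have h1 : cin + 2 + f = (cin + (1 + f)) + 1 := by omega
        rw [h1, pvRun_enter, pvNbrs_def, hrun (1 + f)]
        have h2 : 1 + f = f + 1 := by omega
        rw [h2, pvRun_exit]
      · intro k hndk
        have hkx : k ≠ x := fun h => hndk (h ▸ pvDesc.base)
        have hchild : ∀ y ∈ pvNbrs tree x, y ≠ q → ¬pvDesc tree y k := by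
          intro y hy hyq hdk
          obtain ⟨hyc, hy1, hpy, hdy, hGy⟩ := pvChild tree hE h0 x q y hG hy hyq
          exact hndk (pvDescTrans tree x y k hdk (pvDesc.step hyc hy1 (hpy ▸ pvDesc.base)))
        have hacc_k := hacc k hchild
        by_cases hkq : k = q
        · rw [PySem.Dict.getD_insert, if_pos hkq, if_pos hkq]
          have haccq : acc₂.getD q 0 = acc.getD q 0 := by
            have hchildq : ∀ y ∈ pvNbrs tree x, y ≠ q → ¬pvDesc tree y q := by
              intro y hy hyq hdq
              obtain ⟨hyc, hy1, hpy, hdy, hGy⟩ := pvChild tree hE h0 x q y hG hy hyq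
              have hdle := pvDescD tree y q hyc hdq
              have hqc : q ∈ pvComp tree := pvDescComp tree y q hyc hdq
              rcases hG.2 with ⟨_, hq0⟩ | ⟨hx1, hqp⟩
              · exact h0 (hq0 ▸ hqc)
              · have := (pvParProps tree x hG.1 hx1).2.2
                rw [← hqp] at this
                omega
            rw [hacc q hchildq, if_neg hqx, PySem.Dict.getD_insert, if_neg hqx]
          have haccx : acc₂.getD x 0 = (pvNbrs tree x).foldl
              (fun r y => if y ≠ q then PySem.Int.bxor r (pvVal tree y) else r) 0 := by
            have hchildx : ∀ y ∈ pvNbrs tree x, y ≠ q → ¬pvDesc tree y x := by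
              intro y hy hyq hdx
              obtain ⟨hyc, _, _, hdy, _⟩ := pvChild tree hE h0 x q y hG hy hyq
              have := pvDescD tree y x hyc hdx
              omega
            rw [hacc x hchildx, if_pos rfl, PySem.Dict.getD_insert, if_pos rfl, pvZeroBxor]
          rw [haccq, haccx, ← pvValUnfold tree hE h0 x q hG]
        · rw [PySem.Dict.getD_insert, if_neg hkq, hacc_k, if_neg hkx,
            PySem.Dict.getD_insert, if_neg hkx, if_neg hkq]
      · have hnb_sub : pvNbrs tree x ⊆ pvComp tree :=
          fun y hy => pvCompClosed tree x y hG.1 hy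
        have hnb_len : (pvNbrs tree x).length ≤ (pvComp tree).length :=
          (List.subperm_of_subset (pvNbrsNodup tree x) hnb_sub).length_le
        have hBpos : 1 ≤ ((pvComp tree).length + 2) ^ m :=
          Nat.one_le_pow _ _ (by omega)
        have hcin' : cin ≤ (pvComp tree).length * ((pvComp tree).length + 2) ^ m :=
          le_trans hcin (Nat.mul_le_mul_right _ hnb_len)
        have hps : ((pvComp tree).length + 2) ^ (m + 1) =
            ((pvComp tree).length + 2) ^ m * ((pvComp tree).length + 2) := pow_succ _ _
        nlinarith [hBpos, hcin']

-- ===== VERDICT (by name: the statement is the Claim_ definition above) =====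
theorem pvInsertInsertSelf {ν : Type} (d : PySem.Dict Int ν) (k : Int) (v w : ν) :
    (d.insert k v).insert k w = d.insert k w := by
  apply PySem.Dict.ext
  by_cases hc : d.contains k = true
  · rw [PySem.Dict.items_insert_of_contains _ _ (PySem.Dict.contains_insert_self d k v),
      PySem.Dict.items_insert_of_contains _ _ hc, PySem.Dict.items_insert_of_contains _ _ hc,
      List.map_map]
    apply List.map_congr_left
    intro p _
    simp only [Function.comp]
    by_cases hp : p.1 = k
    · simp [hp]
    · simp [hp]
  · have hc' : d.contains k = false := by simpa using hc
    rw [PySem.Dict.items_insert_of_contains _ _ (PySem.Dict.contains_insert_self d k v),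
      PySem.Dict.items_insert_of_not_contains _ _ hc',
      PySem.Dict.items_insert_of_not_contains _ _ hc', List.map_append]
    have hid : ∀ p ∈ d.items, (if (p.1 == k) = true then (k, w) else p) = p := by
      intro p hp
      rw [if_neg]
      intro hbeq
      have hk : p.1 = k := by simpa using hbeq
      have := PySem.Dict.mem_keys_of_mem_items d hp
      rw [hk] at this
      rw [(PySem.Dict.contains_iff_mem_keys d k).mpr this] at hc'
      cases hc'
    rw [List.map_congr_left hid]
    simp

theorem pvSetdefaultContains (d : PySem.Dict Int (PySem.Set Int)) (k : Int)
    (v : PySem.Set Int) (hc : d.contains k = true) : PySem.Dict.setdefault d k v = d := by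
  rw [PySem.Dict.setdefault, if_pos hc]

theorem pvSetdefaultNot (d : PySem.Dict Int (PySem.Set Int)) (k : Int) (v : PySem.Set Int)
    (hc : d.contains k = false) : PySem.Dict.setdefault d k v = d.insert k v := by
  apply PySem.Dict.ext
  rw [PySem.Dict.setdefault, if_neg (by simp [hc]), PySem.Dict.items_insert_of_not_contains _ _ hc]

theorem pvSetAddEq (d : PySem.Dict Int (PySem.Set Int)) (k w : Int) :
    (PySem.Dict.setdefault d k PySem.Set.empty).insert k
      (PySem.Set.add ((PySem.Dict.setdefault d k PySem.Set.empty).getD k PySem.Set.empty) w) =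
    d.insert k (PySem.Set.add (d.getD k PySem.Set.empty) w) := by
  by_cases hc : d.contains k = true
  · rw [pvSetdefaultContains d k _ hc]
  · have hc' : d.contains k = false := by simpa using hc
    rw [pvSetdefaultNot d k _ hc', PySem.Dict.getD_insert_self, pvInsertInsertSelf,
      PySem.Dict.getD_of_not_contains _ _ hc']

theorem pvAdjB_eq_A (tree : List (Int × Int)) : pvAdjB tree = pvAdjA tree := by
  rw [pvAdjB, pvAdjA]
  apply PySem.List.foldl_congr_mem
  intro adj uv _
  dsimp only
  rw [pvSetAddEq adj uv.1 uv.2, pvSetAddEq _ uv.2 uv.1]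

theorem deforestation_spec : Claim_equal_deforestation := by
  intro n tree hdom hpre
  obtain ⟨hE, h0⟩ := hpre
  unfold Spec_deforestation
  have h1c := pvCompOne tree
  have hG1 : pvGood tree 1 0 := ⟨h1c, Or.inl ⟨rfl, rfl⟩⟩
  have hd1 : pvD tree 1 = 0 := pvDOne tree
  have hLle : (pvComp tree).length ≤ tree.length + 1 := by
    have := pvEdgesLen tree; omega
  have hAside : pvCalc (pvAdjA tree) (tree.length + 2) 1 0 = pvVal tree 1 :=
    pvCalcVal tree hE h0 (tree.length + 2) 1 0 hG1 (by rw [hd1]; omega)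
  obtain ⟨c, acc', hrun, hacc, hc⟩ :=
    pvMain tree hE h0 (pvComp tree).length 1 0 hG1 (by rw [hd1]; omega) []
      (PySem.Dict.ofList [(0, 0)])
  have hcFB : c ≤ (tree.length + 3) ^ (tree.length + 2) := by
    calc c ≤ ((pvComp tree).length + 2) ^ (pvComp tree).length := hc
      _ ≤ (tree.length + 3) ^ (pvComp tree).length := Nat.pow_le_pow_left (by omega) _
      _ ≤ (tree.length + 3) ^ (tree.length + 2) := Nat.pow_le_pow_right (by omega) (by omega)
  have hrunFB : pvRun (pvAdjA tree) ((tree.length + 3) ^ (tree.length + 2))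
      [(1, 0, true)] (PySem.Dict.ofList [(0, 0)]) = acc' := by
    have heq : (tree.length + 3) ^ (tree.length + 2) =
        c + ((tree.length + 3) ^ (tree.length + 2) - c) := by omega
    rw [heq, hrun _, pvRun_nil]
  have hndesc : ¬pvDesc tree 1 0 := by
    intro h
    cases h with
    | step hv _ _ => exact h0 hv
  have hgetD : acc'.getD 0 0 = pvVal tree 1 := by
    rw [hacc 0 hndesc, if_pos rfl,
      show (PySem.Dict.ofList [((0 : Int), (0 : Int))]).getD 0 0 = 0 from rfl, pvZeroBxor]
  show deforestation n tree = deforestation_alt n tree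
  show (if pvCalc (pvAdjA tree) (tree.length + 2) 1 0 - 1 ≠ 0 then "Alice" else "Bob") =
    (if (pvRun (pvAdjB tree) ((tree.length + 3) ^ (tree.length + 2)) [(1, 0, true)]
        (PySem.Dict.ofList [(0, 0)])).getD 0 0 - 1 ≠ 0 then "Alice" else "Bob")
  rw [hAside, pvAdjB_eq_A, hrunFB, hgetD]
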